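-- pv_equiv track=rewrite | github.com/parthchandak02/literature-review-assistant | src/manuscript/contracts.py | _is_heading_subsequence
-- ===== SOURCE A (Python) =====
-- def _is_heading_subsequence(needles: list[tuple[int, str]], haystack: list[tuple[int, str]]) -> bool:
--     """Return True if each needle heading appears in haystack order."""
--     if not needles:
--         return True
--     j = 0
--     for level, title in haystack:
--         n_level, n_title = needles[j]
--         if level == n_level and title.strip().lower() == n_title.strip().lower():
--             j += 1
--             if j >= len(needles):
--                 return True
--     return False
-- ===== SOURCE B (Python) =====
-- def _is_heading_subsequence(needles: list[tuple[int, str]], haystack: list[tuple[int, str]]) -> bool: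
--     """Return True if each needle heading appears in haystack order."""
--     positions = {}
--     for idx, (level, title) in enumerate(haystack):
--         positions.setdefault((level, title.strip().lower()), []).append(idx)
--     i = 0
--     for n_level, n_title in needles:
--         plist = positions.get((n_level, n_title.strip().lower()))
--         if not plist:
--             return False
--         lo, hi = 0, len(plist)
--         while lo < hi:
--             mid = (lo + hi) // 2
--             if plist[mid] < i:
--                 lo = mid + 1
--             else:
--                 hi = mid
--         if lo == len(plist):
--             return False
--         i = plist[lo] + 1
--     return True
-- ===== Notes on version B (the rewrite author's own statement) =====
-- stated objective: alternative
-- what changed: Replaces A's single normalize-as-you-scan two-pointer pass with a staged index-map algorithm: one pass groups haystack positions in a dict keyed by (level, normalized title), then each needle is matched by a hand-written binary search (bisect_left) for the first stored position at or after the current cursor.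
import Mathlib
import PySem

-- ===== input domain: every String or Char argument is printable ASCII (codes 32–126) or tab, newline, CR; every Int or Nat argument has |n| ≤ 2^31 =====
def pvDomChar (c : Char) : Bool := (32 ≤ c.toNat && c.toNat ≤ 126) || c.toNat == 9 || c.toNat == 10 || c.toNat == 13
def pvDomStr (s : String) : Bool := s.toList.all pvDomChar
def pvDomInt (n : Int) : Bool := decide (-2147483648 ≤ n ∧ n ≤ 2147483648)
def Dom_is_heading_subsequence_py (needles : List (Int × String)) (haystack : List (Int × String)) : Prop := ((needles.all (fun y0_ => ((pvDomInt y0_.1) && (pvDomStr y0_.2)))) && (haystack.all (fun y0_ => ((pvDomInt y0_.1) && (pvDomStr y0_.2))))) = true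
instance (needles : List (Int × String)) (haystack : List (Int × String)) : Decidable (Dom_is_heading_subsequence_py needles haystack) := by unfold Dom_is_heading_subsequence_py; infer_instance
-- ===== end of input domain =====

-- B replaces A's two-pointer scan by a staged algorithm: group haystack positions in a
-- dict keyed by (level, normalized title), then binary-search each needle's position list
-- for the first position at or after the cursor (alternative algorithm, same cost class).

-- ===== PORT A =====
def pvNorm (s : String) : String := PySem.Str.lower (PySem.Str.strip s)

-- A's for-loop over haystack, carrying the needle index j (needles[j] via a total lookup;
-- the `none` branch is unreachable while j < needles.length)
def pvAloop (needles : List (Int × String)) : List (Int × String) → Nat → Bool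
  | [], _ => false
  | (level, title) :: rest, j =>
    match needles[j]? with
    | none => false
    | some (nLevel, nTitle) =>
      if level == nLevel && pvNorm title == pvNorm nTitle then
        if j + 1 ≥ needles.length then true else pvAloop needles rest (j + 1)
      else pvAloop needles rest j

def is_heading_subsequence_py (needles : List (Int × String)) (haystack : List (Int × String)) : Bool :=
  if needles.isEmpty then true else pvAloop needles haystack 0

-- ===== PORT B =====
-- the hand-written bisect_left while-loop of Source B (indexing is in range whenever
-- lo < hi ≤ plist.length, so getD's default is never used there)
def pvBisect (plist : List Int) (i : Int) (lo hi : Nat) : Nat :=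
  if lo < hi then
    let mid := (lo + hi) / 2
    if plist.getD mid 0 < i then pvBisect plist i (mid + 1) hi
    else pvBisect plist i lo mid
  else lo
termination_by hi - lo
decreasing_by all_goals omega

-- Source B's for-loop over needles, carrying the cursor i
def pvBLoop (positions : PySem.Dict (Int × String) (List Int)) : List (Int × String) → Int → Bool
  | [], _ => true
  | (nLevel, nTitle) :: ns, i =>
    let plist := positions.getD (nLevel, pvNorm nTitle) []
    if plist.isEmpty then false
    else
      let lo := pvBisect plist i 0 plist.length
      if lo = plist.length then false
      else pvBLoop positions ns (plist.getD lo 0 + 1)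

def is_heading_subsequence_py_alt (needles : List (Int × String)) (haystack : List (Int × String)) : Bool :=
  let positions := (PySem.List.enumerate haystack).foldl
    (fun d p => d.modify (p.2.1, pvNorm p.2.2) [] (· ++ [p.1])) PySem.Dict.empty
  pvBLoop positions needles 0

-- ===== PRECONDITION & SPEC =====
def Spec_is_heading_subsequence_py (needles : List (Int × String)) (haystack : List (Int × String)) (out : Bool) : Prop := out = is_heading_subsequence_py_alt needles haystack
instance (needles : List (Int × String)) (haystack : List (Int × String)) (out : Bool) : Decidable (Spec_is_heading_subsequence_py needles haystack out) := by unfold Spec_is_heading_subsequence_py; infer_instance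

-- ===== CLAIM (what is proved, stated in full; the proofs are below) =====
def Claim_equal_is_heading_subsequence_py : Prop := ∀ (needles : List (Int × String)) (haystack : List (Int × String)), Dom_is_heading_subsequence_py needles haystack → Spec_is_heading_subsequence_py needles haystack (is_heading_subsequence_py needles haystack)

-- ===== LEMMAS AND PROOFS =====

-- Proof-side middle form: outer loop over needles with a sequential scan over the
-- haystack suffix; A is related to it (loop inversion) and B's indexed form to it.
def pvSeqFind (nLevel : Int) (target : String) : List (Int × String) → Option (List (Int × String))
  | [] => none
  | (level, title) :: rest =>
    if level == nLevel && pvNorm title == target then some rest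
    else pvSeqFind nLevel target rest

def pvSeqLoop : List (Int × String) → List (Int × String) → Bool
  | [], _ => true
  | (nLevel, nTitle) :: ns, hay =>
    match pvSeqFind nLevel (pvNorm nTitle) hay with
    | none => false
    | some rest => pvSeqLoop ns rest

-- the ascending list of indices (counted from s) of haystack entries with the given key
def pvMatchIdx (key : Int × String) : Int → List (Int × String) → List Int
  | _, [] => []
  | s, (lv, t) :: rest =>
    if (lv, pvNorm t) = key then s :: pvMatchIdx key (s + 1) rest
    else pvMatchIdx key (s + 1) rest

def pvFirstGE (i : Int) : List Int → Nat
  | [] => 0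
  | x :: xs => if x < i then pvFirstGE i xs + 1 else 0

theorem pvAloop_eq_pvSeqLoop (needles : List (Int × String)) :
    ∀ (hay : List (Int × String)) (j : Nat), j < needles.length →
      pvAloop needles hay j = pvSeqLoop (needles.drop j) hay := by
  intro hay
  induction hay with
  | nil =>
    intro j hj
    have hne : needles.drop j ≠ [] := by
      intro h
      have := List.drop_eq_nil_iff.mp h
      omega
    match hd : needles.drop j with
    | [] => exact absurd hd hne
    | (nl, nt) :: ns => simp [pvAloop, pvSeqLoop, pvSeqFind]
  | cons x rest ih =>
    intro j hj
    obtain ⟨level, title⟩ := x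
    obtain ⟨⟨nl, nt⟩, hget⟩ : ∃ p, needles[j]? = some p :=
      ⟨needles[j], List.getElem?_eq_getElem hj⟩
    have hdrop : needles.drop j = (nl, nt) :: needles.drop (j + 1) := by
      have h1 := List.getElem_cons_drop (as := needles) (h := hj)
      rw [List.getElem?_eq_getElem hj] at hget
      have h2 : needles[j] = (nl, nt) := by exact Option.some.inj hget
      rw [h2] at h1
      exact h1.symm
    by_cases hm : (level == nl && pvNorm title == pvNorm nt) = true
    · by_cases hfin : j + 1 ≥ needles.length
      · have hnil : needles.drop (j + 1) = [] := List.drop_eq_nil_of_le hfin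
        simp [pvAloop, hget, hm, hfin, hdrop, pvSeqLoop, pvSeqFind, hnil]
      · have hj1 : j + 1 < needles.length := by omega
        simp [pvAloop, hget, hm, hfin, hdrop, pvSeqLoop, pvSeqFind, ih (j + 1) hj1]
    · rw [hdrop]
      simp only [pvAloop, hget, hm, if_neg, Bool.false_eq_true, not_false_iff, pvSeqLoop,
        pvSeqFind]
      have := ih j hj
      rw [hdrop] at this
      simpa [pvSeqLoop] using this

theorem pvMatchIdx_mem_bounds (key : Int × String) :
    ∀ (l : List (Int × String)) (s m : Int), m ∈ pvMatchIdx key s l →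
      s ≤ m ∧ m < s + l.length := by
  intro l
  induction l with
  | nil => intro s m h; simp [pvMatchIdx] at h
  | cons x rest ih =>
    intro s m h
    obtain ⟨lv, t⟩ := x
    simp only [pvMatchIdx] at h
    split at h
    · rcases List.mem_cons.mp h with h | h
      · subst h; simp
      · have := ih (s + 1) m h; simp at this ⊢; omega
    · have := ih (s + 1) m h; simp at this ⊢; omega

theorem pvMatchIdx_append (key : Int × String) :
    ∀ (l1 l2 : List (Int × String)) (s : Int),
      pvMatchIdx key s (l1 ++ l2) = pvMatchIdx key s l1 ++ pvMatchIdx key (s + l1.length) l2 := by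
  intro l1
  induction l1 with
  | nil => intro l2 s; simp [pvMatchIdx]
  | cons x rest ih =>
    intro l2 s
    obtain ⟨lv, t⟩ := x
    simp only [List.cons_append, pvMatchIdx]
    split
    · rw [ih]; simp; ring_nf
    · rw [ih]; simp; ring_nf

theorem pvMatchIdx_pairwise (key : Int × String) :
    ∀ (l : List (Int × String)) (s : Int), (pvMatchIdx key s l).Pairwise (· < ·) := by
  intro l
  induction l with
  | nil => intro s; simp [pvMatchIdx]
  | cons x rest ih =>
    intro s
    obtain ⟨lv, t⟩ := x
    simp only [pvMatchIdx]
    split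
    · refine List.Pairwise.cons ?_ (ih (s + 1))
      intro m hm
      have := pvMatchIdx_mem_bounds key rest (s + 1) m hm
      omega
    · exact ih (s + 1)

theorem pvFirstGE_unique (i : Int) :
    ∀ (l : List Int) (k : Nat), k ≤ l.length →
      (∀ m : Nat, m < k → l.getD m 0 < i) →
      (k < l.length → ¬ l.getD k 0 < i) →
      pvFirstGE i l = k := by
  intro l
  induction l with
  | nil => intro k hk _ _; simp at hk; simp [pvFirstGE, hk]
  | cons x xs ih =>
    intro k hk h1 h2
    simp only [pvFirstGE]
    by_cases hx : x < i
    · have hk0 : k ≠ 0 := by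
        intro h; subst h
        exact (h2 (by simp)) (by simpa using hx)
      obtain ⟨k', rfl⟩ : ∃ k', k = k' + 1 := ⟨k - 1, by omega⟩
      rw [if_pos hx, ih k' (by simpa using hk)
        (fun m hm => by simpa using h1 (m + 1) (by omega))
        (fun hlt => by simpa using h2 (by simpa using hlt))]
    · rw [if_neg hx]
      by_contra hne
      exact hx (by simpa using h1 0 (by omega))

theorem pvFirstGE_append (i : Int) (A B : List Int)
    (hA : ∀ x ∈ A, x < i) (hB : ∀ x ∈ B, ¬ x < i) :
    pvFirstGE i (A ++ B) = A.length := by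
  induction A with
  | nil =>
    cases B with
    | nil => simp [pvFirstGE]
    | cons y ys => simp [pvFirstGE, hB y (by simp)]
  | cons x xs ih =>
    simp only [List.cons_append, pvFirstGE, if_pos (hA x (by simp)),
      ih (fun z hz => hA z (by simp [hz])), List.length_cons]

theorem pvBisect_correct (l : List Int) (i : Int)
    (hmono : ∀ a b : Nat, a ≤ b → b < l.length → l.getD a 0 ≤ l.getD b 0) :
    ∀ (lo hi : Nat), lo ≤ hi → hi ≤ l.length →
      (∀ m : Nat, m < lo → l.getD m 0 < i) →
      (∀ m : Nat, hi ≤ m → m < l.length → ¬ l.getD m 0 < i) →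
      pvBisect l i lo hi = pvFirstGE i l := by
  have main : ∀ (n lo hi : Nat), hi - lo = n → lo ≤ hi → hi ≤ l.length →
      (∀ m : Nat, m < lo → l.getD m 0 < i) →
      (∀ m : Nat, hi ≤ m → m < l.length → ¬ l.getD m 0 < i) →
      pvBisect l i lo hi = pvFirstGE i l := by
    intro n
    induction n using Nat.strong_induction_on with
    | _ n ih =>
      intro lo hi hn hle hhi h1 h2
      rw [pvBisect]
      by_cases hlt : lo < hi
      · rw [if_pos hlt]
        have hmlt : (lo + hi) / 2 < hi := by omega
        have hmge : lo ≤ (lo + hi) / 2 := by omega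
        by_cases hc : l.getD ((lo + hi) / 2) 0 < i
        · simp only [hc, if_pos]
          exact ih (hi - ((lo + hi) / 2 + 1)) (by omega) _ hi rfl (by omega) hhi
            (fun m hm => lt_of_le_of_lt (hmono m ((lo + hi) / 2) (by omega) (by omega)) hc) h2
        · simp only [hc, if_neg, Bool.false_eq_true, not_false_iff]
          exact ih ((lo + hi) / 2 - lo) (by omega) lo _ rfl (by omega) (by omega) h1
            (fun m hm hml hcon => hc (lt_of_le_of_lt (hmono ((lo + hi) / 2) m hm hml) hcon))
      · rw [if_neg hlt]
        have heq : lo = hi := by omega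
        subst heq
        exact (pvFirstGE_unique i l lo (by omega) h1 (fun hlen => h2 lo le_rfl hlen)).symm
  exact fun lo hi h1 h2 h3 h4 => main (hi - lo) lo hi rfl h1 h2 h3 h4

-- the dict built by Source B maps each key to its ascending list of haystack indices
theorem pvPositions_getD (hay : List (Int × String)) (key : Int × String) :
    ((PySem.List.enumerate hay).foldl
      (fun d p => d.modify (p.2.1, pvNorm p.2.2) [] (· ++ [p.1])) PySem.Dict.empty).getD key []
      = pvMatchIdx key 0 hay := by
  have gen : ∀ (l : List (Int × String)) (s : Int) (d : PySem.Dict (Int × String) (List Int)),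
      ((PySem.List.enumerate l s).foldl
        (fun d p => d.modify (p.2.1, pvNorm p.2.2) [] (· ++ [p.1])) d).getD key []
      = d.getD key [] ++ pvMatchIdx key s l := by
    intro l
    induction l with
    | nil => intro s d; simp [PySem.List.enumerate_nil, pvMatchIdx]
    | cons x rest ih =>
      intro s d
      obtain ⟨lv, t⟩ := x
      rw [PySem.List.enumerate_cons]
      simp only [List.foldl_cons]
      rw [ih (s + 1)]
      rw [PySem.Dict.getD_modify]
      by_cases h : (lv, pvNorm t) = key
      · rw [if_pos h.symm]
        simp [pvMatchIdx, h]
      · rw [if_neg (fun hc => h hc.symm)]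
        simp [pvMatchIdx, h]
  rw [gen hay 0 PySem.Dict.empty, PySem.Dict.getD_empty]
  simp

theorem pvSeqFind_eq_matchIdx (nl : Int) (nt : String) :
    ∀ (l : List (Int × String)) (s : Int),
      pvSeqFind nl (pvNorm nt) l
        = (pvMatchIdx (nl, pvNorm nt) s l).head?.map (fun m => l.drop ((m - s).toNat + 1)) := by
  intro l
  induction l with
  | nil => intro s; simp [pvSeqFind, pvMatchIdx]
  | cons x rest ih =>
    intro s
    obtain ⟨lv, t⟩ := x
    by_cases h : (lv, pvNorm t) = (nl, pvNorm nt)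
    · have hb : (lv == nl && pvNorm t == pvNorm nt) = true := by
        simp [Prod.ext_iff] at h; simp [h.1, h.2]
      simp [pvSeqFind, pvMatchIdx, hb, h]
    · have hb : ¬ (lv == nl && pvNorm t == pvNorm nt) = true := by
        simp [Prod.ext_iff] at h ⊢; intro h1; exact h h1
      simp only [pvSeqFind, if_neg hb, pvMatchIdx, if_neg h]
      rw [ih (s + 1)]
      cases hh : (pvMatchIdx (nl, pvNorm nt) (s + 1) rest).head? with
      | none => simp
      | some m =>
        have hmem : m ∈ pvMatchIdx (nl, pvNorm nt) (s + 1) rest := by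
          cases hl : pvMatchIdx (nl, pvNorm nt) (s + 1) rest with
          | nil => simp [hl] at hh
          | cons a b => rw [hl] at hh; simp at hh; simp [hl, hh]
        have hge : s + 1 ≤ m := (pvMatchIdx_mem_bounds _ rest (s + 1) m hmem).1
        have hnat : (m - s).toNat = (m - (s + 1)).toNat + 1 := by omega
        simp [hnat, List.drop_succ_cons]

theorem pvBLoop_eq_pvSeqLoop (hay : List (Int × String)) :
    ∀ (ns : List (Int × String)) (i : Int), 0 ≤ i → i ≤ hay.length →
      pvBLoop ((PySem.List.enumerate hay).foldl
        (fun d p => d.modify (p.2.1, pvNorm p.2.2) [] (· ++ [p.1])) PySem.Dict.empty) ns i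
        = pvSeqLoop ns (hay.drop i.toNat) := by
  intro ns
  induction ns with
  | nil => intro i _ _; simp [pvBLoop, pvSeqLoop]
  | cons x ns ih =>
    intro i h0 hlen
    obtain ⟨nl, nt⟩ := x
    have hplist := pvPositions_getD hay (nl, pvNorm nt)
    have htdlen : (hay.take i.toNat).length = i.toNat := by
      simp [List.length_take]; omega
    have hcast : ((hay.take i.toNat).length : Int) = i := by rw [htdlen]; omega
    have hsplit : pvMatchIdx (nl, pvNorm nt) 0 hay
        = pvMatchIdx (nl, pvNorm nt) 0 (hay.take i.toNat)
          ++ pvMatchIdx (nl, pvNorm nt) i (hay.drop i.toNat) := by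
      conv_lhs => rw [← List.take_append_drop i.toNat hay]
      rw [pvMatchIdx_append, zero_add, hcast]
    have hA : ∀ x ∈ pvMatchIdx (nl, pvNorm nt) 0 (hay.take i.toNat), x < i := by
      intro x hx
      have := pvMatchIdx_mem_bounds (nl, pvNorm nt) _ 0 x hx
      rw [hcast] at this; omega
    have hB : ∀ x ∈ pvMatchIdx (nl, pvNorm nt) i (hay.drop i.toNat), ¬ x < i := by
      intro x hx
      have := pvMatchIdx_mem_bounds (nl, pvNorm nt) _ i x hx
      omega
    have hmono : ∀ a b : Nat, a ≤ b → b < (pvMatchIdx (nl, pvNorm nt) 0 hay).length →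
        (pvMatchIdx (nl, pvNorm nt) 0 hay).getD a 0 ≤ (pvMatchIdx (nl, pvNorm nt) 0 hay).getD b 0 := by
      intro a b hab hb
      rcases Nat.lt_or_ge a b with h | h
      · have hlt := (List.pairwise_iff_getElem.mp (pvMatchIdx_pairwise (nl, pvNorm nt) hay 0))
          a b (by omega) hb h
        rw [List.getD_eq_getElem _ _ (by omega), List.getD_eq_getElem _ _ hb]
        exact le_of_lt hlt
      · have : a = b := by omega
        subst this; rfl
    have hbis : pvBisect (pvMatchIdx (nl, pvNorm nt) 0 hay) i 0 (pvMatchIdx (nl, pvNorm nt) 0 hay).length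
        = (pvMatchIdx (nl, pvNorm nt) 0 (hay.take i.toNat)).length := by
      rw [pvBisect_correct _ i hmono 0 _ (Nat.zero_le _) le_rfl (by omega) (by omega)]
      rw [hsplit, pvFirstGE_append i _ _ hA hB]
    have hseqfind := pvSeqFind_eq_matchIdx nl nt (hay.drop i.toNat) i
    simp only [pvBLoop, pvSeqLoop, hplist, hbis, hseqfind]
    cases hBcase : pvMatchIdx (nl, pvNorm nt) i (hay.drop i.toNat) with
    | nil =>
      have hAeq : pvMatchIdx (nl, pvNorm nt) 0 hay
          = pvMatchIdx (nl, pvNorm nt) 0 (hay.take i.toNat) := by rw [hsplit, hBcase, List.append_nil]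
      by_cases hemp : (pvMatchIdx (nl, pvNorm nt) 0 hay).isEmpty
      · simp [hemp]
      · simp [hemp, hAeq]
    | cons m tail =>
      have hne : ¬ (pvMatchIdx (nl, pvNorm nt) 0 hay).isEmpty := by
        rw [hsplit, hBcase]; simp
      have hlolt : (pvMatchIdx (nl, pvNorm nt) 0 (hay.take i.toNat)).length
          ≠ (pvMatchIdx (nl, pvNorm nt) 0 hay).length := by
        rw [hsplit, hBcase]; simp
      have hmmem : m ∈ pvMatchIdx (nl, pvNorm nt) i (hay.drop i.toNat) := by
        rw [hBcase]; simp
      have hmb := pvMatchIdx_mem_bounds (nl, pvNorm nt) _ i m hmmem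
      have hmlen : m < (hay.length : Int) := by
        have : ((hay.drop i.toNat).length : Int) = (hay.length : Int) - i := by
          simp [List.length_drop]; omega
        omega
      have hget : (pvMatchIdx (nl, pvNorm nt) 0 hay).getD
          (pvMatchIdx (nl, pvNorm nt) 0 (hay.take i.toNat)).length 0 = m := by
        rw [hsplit, hBcase, List.getD_eq_getElem?_getD,
          List.getElem?_append_right (le_refl _)]
        simp
      have hdd : (hay.drop i.toNat).drop ((m - i).toNat + 1) = hay.drop (m + 1).toNat := by
        rw [List.drop_drop]
        congr 1
        omega
      have hrec := ih (m + 1) (by omega) (by omega)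
      simp only [hne, hBcase, hlolt, hget, List.head?_cons, Option.map_some, if_neg,
        Bool.false_eq_true, not_false_iff, List.isEmpty_iff, hdd, hrec]

-- ===== VERDICT (by name: the statement is the Claim_ definition above) =====
theorem is_heading_subsequence_py_spec : Claim_equal_is_heading_subsequence_py := by
  intro needles haystack _
  unfold Spec_is_heading_subsequence_py is_heading_subsequence_py is_heading_subsequence_py_alt
  match needles with
  | [] => simp [pvBLoop]
  | n :: ns =>
    simp only [List.isEmpty_cons, if_neg Bool.false_ne_true]
    rw [pvAloop_eq_pvSeqLoop (n :: ns) haystack 0 (by simp),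
      pvBLoop_eq_pvSeqLoop haystack (n :: ns) 0 le_rfl (by positivity)]
    simp
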